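/- GENERATED by tools/from_farm_form.py from prooffarm-gif/accepted/DGifGetImageHeader.4/Proof.lean (a worked proof of the farm's unit `DGifGetImageHeader.4`,
   accepted by the verdict) — do not edit. -/
import Gif.Spec.Units.DGifGetImageHeader_4
import Gif.Spec.AllSegs
import Gif.Spec.Proved.DGifGetImageHeader_4_Lemmas

open X86 X86.User Asan ProgX.Base ProgX.Base.Spec Gif.Spec

/-!
  `DGifGetImageHeader.4` (0x108ffe … 0x10902f and 0x1090e3 … 0x109123, 25 instructions; dgif_lib.c:404-410): THE HEAD OF THE COLOUR
  LOOP of a protected function. The test `i < ColorCount` (to 0x108f4e when false), `InternalRead(gif, Buf, 3)`, and on a short read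
  the free of the image's colour map with the stores of `Error` and NULL. The return address 0x109026 (`ret24`) of InternalRead is
  not a cut of the design, so the unit makes it one of its own: the private assertion `gih4_AtRet24` and two walks (Lemmas.lean),
  chained here.
-/

/-- Segment 4 of `DGifGetImageHeader` takes `Head` at 0x108ffe to `Colour` at 0x10902f, `Mid` at 0x108f4e or `Done` at 0x108e78. -/
theorem Gif.Spec.Proved.DGifGetImageHeader_4_ok : Gif.Spec.DGifGetImageHeader_4.Statement := by
  intro Lay hLay μ hμ u₀ hcode h_InternalRead h_GifFreeMapObject h_load4 h_load8 h_store4 h_store8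
  intro H rest frames F R e ret m Hc Fc v hat
  -- InternalRead's contract for the PRESENT heap and forest, the frame list of the body, the request of 3 bytes
  have hir := h_InternalRead Hc rest (DGifGetImageHeader.framesIn frames e) Fc R 3
  -- 0x108ffe … the test … 0x108f4e, or … the call … 0x109026
  refine (Gif.Spec.DGifGetImageHeader_4.gih4_seg_head Lay hLay μ hμ u₀ hcode H rest frames F R e ret m Hc Fc hir h_load4
    v hat).trans ?_
  intro v1 hv1
  rcases hv1 with hexit | hret
  · -- 0x108f4e: all colours are read
    exact ReachVia.done (Or.inr (Or.inl hexit))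
  · -- 0x109026 … 0x10902f, or … 0x108e78: GifFreeMapObject's contract for the map of the loop's invariant
    obtain ⟨hmid, mp, hicm, hlt, hmeas⟩ := hret
    have hfm := h_GifFreeMapObject Hc rest (DGifGetImageHeader.framesIn frames e) mp.colors (3 * mp.count)
    refine (Gif.Spec.DGifGetImageHeader_4.gih4_seg_tail Lay hLay μ hμ u₀ hcode H rest frames F R e ret m Hc Fc mp hfm
      h_load8 h_store4 h_store8 v1 hmid hicm hlt hmeas).mono ?_
    intro w hw
    rcases hw with hcol | hdone
    · exact Or.inl hcol
    · exact Or.inr (Or.inr hdone)
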